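-- pv_equiv track=rewrite | github.com/darki73/sylvan | src/sylvan/extensions/native/kubernetes/__init__.py | is_k8s_yaml
-- ===== SOURCE A (Python) =====
-- def is_k8s_yaml(content: str) -> bool:
--     """Quick check if YAML content looks like a k8s resource.
--
--     Checks for apiVersion + kind without full YAML parsing.
--     Rejects Helm templates (contains {{ }}).
--     """
--     if "{{" in content:
--         return False
--     has_api = False
--     has_kind = False
--     for line in content.split("\n")[:30]:
--         stripped = line.strip()
--         if stripped.startswith("apiVersion:"):
--             has_api = True
--         elif stripped.startswith("kind:"):
--             has_kind = True
--         if has_api and has_kind: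
--             return True
--     return False
-- ===== SOURCE B (Python) =====
-- def is_k8s_yaml(content: str) -> bool:
--     """Quick check if YAML content looks like a k8s resource.
--
--     Instead of prefix-testing each line against the two literals, build the
--     set of top-level YAML keys (the text before the first ':' of each stripped
--     line) found in the first 30 lines, then ask whether both required keys
--     are present.  Rejects Helm templates (contains {{).
--     """
--     if "{{" in content:
--         return False
--     keys = set()
--     for line in content.split("\n")[:30]:
--         stripped = line.strip()
--         i = stripped.find(":")
--         if i >= 0:
--             keys.add(stripped[:i])
--     return "apiVersion" in keys and "kind" in keys
-- ===== Notes on version B (the rewrite author's own statement) =====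
-- stated objective: alternative
-- what changed: B collects the set of top-level YAML keys (text before the first ':' of each stripped line) from the first 30 lines and then tests membership of 'apiVersion' and 'kind', instead of A's stateful loop that prefix-tests every stripped line against the two literals with an early exit.
import Mathlib
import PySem

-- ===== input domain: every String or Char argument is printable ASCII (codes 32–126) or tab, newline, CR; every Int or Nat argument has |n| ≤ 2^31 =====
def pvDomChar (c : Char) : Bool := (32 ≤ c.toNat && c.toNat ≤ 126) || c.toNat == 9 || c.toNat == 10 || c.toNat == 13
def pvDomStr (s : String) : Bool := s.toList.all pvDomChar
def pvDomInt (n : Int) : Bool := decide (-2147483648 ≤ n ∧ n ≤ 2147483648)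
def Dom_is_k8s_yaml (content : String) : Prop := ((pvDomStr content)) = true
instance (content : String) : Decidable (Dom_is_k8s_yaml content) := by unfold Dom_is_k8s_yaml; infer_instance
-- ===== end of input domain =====

-- B builds the set of top-level YAML keys (text before the first ':' of each stripped line) of the
-- first 30 lines and tests membership of the two required keys, instead of A's flag-tracking
-- prefix-test loop with early exit (alternative decomposition).

-- ===== PORT A =====
-- the for-loop of A: state (has_api, has_kind), early return True when both set
def aLoop : List String → Bool → Bool → Bool
  | [], _, _ => false
  | line :: rest, hasApi, hasKind =>
    let stripped := PySem.Str.strip line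
    let hasApi' := if PySem.Str.startswith stripped "apiVersion:" then true else hasApi
    let hasKind' :=
      if PySem.Str.startswith stripped "apiVersion:" then hasKind
      else if PySem.Str.startswith stripped "kind:" then true else hasKind
    if hasApi' && hasKind' then true else aLoop rest hasApi' hasKind'

def is_k8s_yaml (content : String) : Bool :=
  if PySem.Str.isIn "{{" content then false
  else
    aLoop (PySem.List.slice ((PySem.Str.split? content "\n").getD []) none (some 30)) false false

-- ===== PORT B =====
-- B's loop: collect the text before the first ':' of each stripped line into a set
def bStep (keys : PySem.Set String) (line : String) : PySem.Set String :=
  let stripped := PySem.Str.strip line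
  let i := PySem.Str.find stripped ":"
  if 0 ≤ i then PySem.Set.add keys (PySem.Str.slice stripped none (some i)) else keys

def bKeys (head : List String) : PySem.Set String :=
  head.foldl bStep PySem.Set.empty

def is_k8s_yaml_alt (content : String) : Bool :=
  if PySem.Str.isIn "{{" content then false
  else
    let keys := bKeys (PySem.List.slice ((PySem.Str.split? content "\n").getD []) none (some 30))
    PySem.Set.contains keys "apiVersion" && PySem.Set.contains keys "kind"

-- ===== PRECONDITION & SPEC =====
def Spec_is_k8s_yaml (content : String) (out : Bool) : Prop := out = is_k8s_yaml_alt content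
instance (content : String) (out : Bool) : Decidable (Spec_is_k8s_yaml content out) := by unfold Spec_is_k8s_yaml; infer_instance

-- ===== CLAIM (what is proved, stated in full; the proofs are below) =====
def Claim_equal_is_k8s_yaml : Prop := ∀ (content : String), Dom_is_k8s_yaml content → Spec_is_k8s_yaml content (is_k8s_yaml content)

-- ===== LEMMAS AND PROOFS =====

-- the key a single line contributes to bKeys, if any
def keyOf (line : String) : Option String :=
  let stripped := PySem.Str.strip line
  let i := PySem.Str.find stripped ":"
  if 0 ≤ i then some (PySem.Str.slice stripped none (some i)) else none

-- no stripped line starts with both "apiVersion:" and "kind:"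
theorem not_api_and_kind (s : String) :
    ¬ (PySem.Str.startswith s "apiVersion:" = true ∧ PySem.Str.startswith s "kind:" = true) := by
  rintro ⟨h1, h2⟩
  rw [PySem.Str.startswith_eq, PySem.Chars.startswith_iff] at h1 h2
  have : ("kind:".toList) <+: ("apiVersion:".toList) :=
    List.prefix_of_prefix_length_le h2 h1 (by decide)
  revert this; decide

theorem aLoop_eq (lines : List String) (ha hk : Bool) (h : ¬ (ha = true ∧ hk = true)) :
    aLoop lines ha hk =
      ((ha || lines.any fun l => PySem.Str.startswith (PySem.Str.strip l) "apiVersion:") &&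
       (hk || lines.any fun l => PySem.Str.startswith (PySem.Str.strip l) "kind:")) := by
  induction lines generalizing ha hk with
  | nil => cases ha <;> cases hk <;> simp_all [aLoop]
  | cons line rest ih =>
    cases hapi : PySem.Str.startswith (PySem.Str.strip line) "apiVersion:" with
    | true =>
      have hkind : PySem.Str.startswith (PySem.Str.strip line) "kind:" = false := by
        cases hx : PySem.Str.startswith (PySem.Str.strip line) "kind:"
        · rfl
        · exact absurd ⟨hapi, hx⟩ (not_api_and_kind _)
      cases hk with
      | true =>
        simp only [aLoop, List.any_cons, hapi, hkind]
        simp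
      | false =>
        simp only [aLoop, List.any_cons, hapi, hkind]
        simp [ih true false (by simp)]
    | false =>
      cases hkind : PySem.Str.startswith (PySem.Str.strip line) "kind:" with
      | true =>
        cases ha with
        | true =>
          simp only [aLoop, List.any_cons, hapi, hkind]
          simp
        | false =>
          simp only [aLoop, List.any_cons, hapi, hkind]
          simp [ih false true (by simp)]
      | false =>
        cases ha with
        | true =>
          cases hk with
          | true => exact absurd ⟨rfl, rfl⟩ h
          | false =>
            simp only [aLoop, List.any_cons, hapi, hkind]
            simp [ih true false (by simp)]
        | false =>
          simp only [aLoop, List.any_cons, hapi, hkind]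
          simp [ih false hk (by simp)]

-- membership in the key set: x is a key of some line
theorem step_eq (keys : PySem.Set String) (line : String) :
    bStep keys line
    = match keyOf line with
      | some k => PySem.Set.add keys k
      | none => keys := by
  unfold bStep keyOf
  dsimp only
  split <;> rfl

theorem mem_bKeys_aux (lines : List String) (s0 : PySem.Set String) (x : String) :
    x ∈ lines.foldl bStep s0
    ↔ x ∈ s0 ∨ ∃ l ∈ lines, keyOf l = some x := by
  induction lines generalizing s0 with
  | nil => simp
  | cons line rest ih =>
    rw [List.foldl_cons, step_eq, ih]
    cases hk : keyOf line with
    | none => simp [hk]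
    | some k =>
      simp only [PySem.Set.mem_add, List.mem_cons]
      constructor
      · rintro ((hx | rfl) | ⟨l, hl, hkey⟩)
        · exact Or.inl hx
        · exact Or.inr ⟨line, Or.inl rfl, hk⟩
        · exact Or.inr ⟨l, Or.inr hl, hkey⟩
      · rintro (hx | ⟨l, rfl | hl, hkey⟩)
        · exact Or.inl (Or.inl hx)
        · rw [hk] at hkey; exact Or.inl (Or.inr (Option.some.inj hkey).symm)
        · exact Or.inr ⟨l, hl, hkey⟩

-- character-level: a singleton prefix of a drop is an indexed element
theorem singleton_prefix_drop {c : Char} {s : List Char} {j : Nat} :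
    [c] <+: s.drop j ↔ s[j]? = some c := by
  constructor
  · rintro ⟨t, ht⟩
    have h0 : (s.drop j)[0]? = some c := by rw [← ht]; rfl
    simpa using h0
  · intro h
    have h0 : (s.drop j)[0]? = some c := by simpa using h
    cases hd : s.drop j with
    | nil => simp [hd] at h0
    | cons a t => rw [hd] at h0; simp at h0; exact ⟨t, by simp [hd, h0]⟩

-- the core fact: "text before the first ':' equals k" ⟺ "starts with k ++ ':'", for colon-free k
theorem key_iff_prefix (s k : List Char) (hk : ':' ∉ k) :
    (0 ≤ PySem.Chars.find s [':'] ∧ s.take (PySem.Chars.find s [':']).toNat = k)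
    ↔ (k ++ [':']) <+: s := by
  constructor
  · rintro ⟨hge, htake⟩
    obtain ⟨hpre, -⟩ := PySem.Chars.find_spec (s := s) (sub := [':']) hge
    rw [singleton_prefix_drop] at hpre
    set n := (PySem.Chars.find s [':']).toNat with hn
    have hlen : n < s.length := by
      by_contra hcon
      rw [List.getElem?_eq_none (by omega)] at hpre
      simp at hpre
    refine ⟨s.drop (n + 1), ?_⟩
    have hdrop : s.drop n = ':' :: s.drop (n + 1) := by
      rw [List.drop_eq_getElem_cons hlen]
      have : s[n] = ':' := by
        have := List.getElem?_eq_getElem hlen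
        rw [this] at hpre; exact Option.some.inj hpre
      rw [this]
    calc k ++ [':'] ++ s.drop (n + 1) = s.take n ++ (':' :: s.drop (n + 1)) := by
            rw [htake]; simp
      _ = s.take n ++ s.drop n := by rw [hdrop]
      _ = s := List.take_append_drop n s
  · rintro ⟨t, ht⟩
    set n := k.length with hn
    have hsn : s[n]? = some ':' := by
      rw [← ht, List.append_assoc, List.getElem?_append_right (by simp [hn])]
      simp [hn]
    have hinf : [':'] <:+: s :=
      (singleton_prefix_drop.mpr hsn).isInfix.trans (List.drop_suffix n s).isInfix
    have hge : 0 ≤ PySem.Chars.find s [':'] := by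
      have h1 := (PySem.Chars.find_ne_neg_one_iff (s := s) (sub := [':'])).mpr hinf
      have h2 := PySem.Chars.neg_one_le_find (s := s) (sub := [':'])
      omega
    obtain ⟨hpre, hmin⟩ := PySem.Chars.find_spec (s := s) (sub := [':']) hge
    set f := (PySem.Chars.find s [':']).toNat with hf
    have hfn : f = n := by
      have hle : f ≤ n := by
        by_contra hcon
        exact hmin n (by omega) (singleton_prefix_drop.mpr hsn)
      rcases Nat.lt_or_ge f n with hlt | hgef
      · exfalso
        rw [singleton_prefix_drop] at hpre
        have hsf : s[f]? = k[f]? := by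
          rw [← ht, List.append_assoc, List.getElem?_append_left (by omega : f < k.length)]
        rw [hsf, List.getElem?_eq_getElem (by omega)] at hpre
        exact hk (Option.some.inj hpre ▸ List.getElem_mem _)
      · omega
    refine ⟨hge, ?_⟩
    rw [hfn, ← ht, List.append_assoc, hn, List.take_left]

-- per-line: keyOf gives k exactly when the stripped line starts with k ++ ":"
theorem keyOf_eq_iff (line k : String) (hk : ':' ∉ k.toList) :
    keyOf line = some k ↔ PySem.Str.startswith (PySem.Str.strip line) (k ++ ":") = true := by
  have hstrip : (PySem.Str.strip line).toList = PySem.Chars.strip line.toList := by simp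
  have hcore := key_iff_prefix ((PySem.Str.strip line).toList) k.toList hk
  have hfind : PySem.Str.find (PySem.Str.strip line) ":" =
      PySem.Chars.find (PySem.Str.strip line).toList [':'] := by
    rw [PySem.Str.find_eq, hstrip]; rfl
  have hrhs : (PySem.Str.startswith (PySem.Str.strip line) (k ++ ":") = true)
      ↔ (k.toList ++ [':']) <+: (PySem.Str.strip line).toList := by
    rw [PySem.Str.startswith_eq, PySem.Chars.startswith_iff,
        (by simp : (k ++ (":" : String)).toList = k.toList ++ [':']), hstrip]
  rw [hrhs, ← hcore]
  unfold keyOf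
  by_cases h : 0 ≤ PySem.Chars.find (PySem.Str.strip line).toList [':']
  · rw [if_pos (hfind ▸ h)]
    have hslice : (PySem.Str.slice (PySem.Str.strip line) none
        (some (PySem.Str.find (PySem.Str.strip line) ":"))).toList =
        (PySem.Str.strip line).toList.take
          (PySem.Chars.find (PySem.Str.strip line).toList [':']).toNat := by
      rw [PySem.Str.toList_slice, hfind]
      exact PySem.List.slice_to _ h
    constructor
    · rintro h2
      refine ⟨h, ?_⟩
      have h2' := Option.some.inj h2
      rw [← String.toList_inj, hslice] at h2'
      exact h2'
    · rintro ⟨-, h2⟩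
      rw [Option.some.injEq, ← String.toList_inj, hslice]
      exact h2
  · rw [if_neg (fun hc => h (hfind ▸ hc))]
    constructor
    · intro h2; simp at h2
    · rintro ⟨h1, -⟩; exact absurd h1 h

-- ===== VERDICT (by name: the statement is the Claim_ definition above) =====
theorem is_k8s_yaml_spec : Claim_equal_is_k8s_yaml := by
  intro content _
  unfold Spec_is_k8s_yaml is_k8s_yaml is_k8s_yaml_alt
  cases hin : PySem.Str.isIn "{{" content with
  | true => simp
  | false =>
    rw [if_neg Bool.false_ne_true, if_neg Bool.false_ne_true]
    show aLoop (PySem.List.slice ((PySem.Str.split? content "\n").getD []) none (some 30)) false false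
      = ((bKeys (PySem.List.slice ((PySem.Str.split? content "\n").getD []) none (some 30))).contains "apiVersion"
         && (bKeys (PySem.List.slice ((PySem.Str.split? content "\n").getD []) none (some 30))).contains "kind")
    rw [aLoop_eq _ false false (by simp)]
    set head := PySem.List.slice ((PySem.Str.split? content "\n").getD []) none (some 30) with hh
    have hmem : ∀ (k : String), ':' ∉ k.toList →
        (PySem.Set.contains (bKeys head) k
          = (head.any fun l => PySem.Str.startswith (PySem.Str.strip l) (k ++ ":"))) := by
      intro k hknc
      rw [Bool.eq_iff_iff]
      constructor
      · intro hc
        have hmem' : k ∈ bKeys head := by simpa [PySem.Set.contains] using hc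
        rw [bKeys, mem_bKeys_aux] at hmem'
        rcases hmem' with h0 | ⟨l, hl, hkey⟩
        · simp [PySem.Set.empty] at h0
        · rw [List.any_eq_true]
          exact ⟨l, hl, (keyOf_eq_iff l k hknc).mp hkey⟩
      · intro ha
        rw [List.any_eq_true] at ha
        obtain ⟨l, hl, hs⟩ := ha
        have hmem' : k ∈ bKeys head := by
          rw [bKeys, mem_bKeys_aux]
          exact Or.inr ⟨l, hl, (keyOf_eq_iff l k hknc).mpr hs⟩
        simpa [PySem.Set.contains] using hmem'
    have h1 := hmem "apiVersion" (by decide)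
    have h2 := hmem "kind" (by decide)
    simp only [Bool.false_or]
    rw [show ("apiVersion:" : String) = "apiVersion" ++ ":" from rfl,
        show ("kind:" : String) = "kind" ++ ":" from rfl, h1, h2]
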